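-- pv_equiv track=rewrite | github.com/RycnCDL/sentinel-mcp-server | src/mcp_server/tools/management/health_check.py | _calculate_summary_status
-- ===== SOURCE A (Python) =====
-- from typing import List, Dict, Any, Optional
-- from enum import Enum
--
-- class HealthStatus(str, Enum):
--     """Health status levels"""
--
--     HEALTHY = "healthy"
--     WARNING = "warning"
--     ERROR = "error"
--     UNKNOWN = "unknown"
--
-- def _calculate_summary_status(results: List[Dict[str, Any]]) -> str:
--     """Calculate overall summary status"""
--     if any(r["status"] == HealthStatus.ERROR for r in results):
--         return "degraded"
--     if any(r["status"] == HealthStatus.WARNING for r in results):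
--         return "warning"
--     if all(r["status"] == HealthStatus.HEALTHY for r in results):
--         return "healthy"
--     return "unknown"
-- ===== SOURCE B (Python) =====
-- def _calculate_summary_status(results):
--     """Single pass: return on first error; collect warning/healthy flags, decide after."""
--     has_warning = False
--     all_healthy = True
--     for r in results:
--         s = r["status"]
--         if s == "error":
--             return "degraded"
--         if s == "warning":
--             has_warning = True
--         if s != "healthy":
--             all_healthy = False
--     if has_warning:
--         return "warning"
--     if all_healthy:
--         return "healthy"
--     return "unknown"
-- ===== Notes on version B (the rewrite author's own statement) =====
-- stated objective: alternative
-- what changed: Replaces A's three separate scans (any error / any warning / all healthy) by one loop that returns on the first error and carries has_warning/all_healthy flags, deciding after the loop.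
import Mathlib
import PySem

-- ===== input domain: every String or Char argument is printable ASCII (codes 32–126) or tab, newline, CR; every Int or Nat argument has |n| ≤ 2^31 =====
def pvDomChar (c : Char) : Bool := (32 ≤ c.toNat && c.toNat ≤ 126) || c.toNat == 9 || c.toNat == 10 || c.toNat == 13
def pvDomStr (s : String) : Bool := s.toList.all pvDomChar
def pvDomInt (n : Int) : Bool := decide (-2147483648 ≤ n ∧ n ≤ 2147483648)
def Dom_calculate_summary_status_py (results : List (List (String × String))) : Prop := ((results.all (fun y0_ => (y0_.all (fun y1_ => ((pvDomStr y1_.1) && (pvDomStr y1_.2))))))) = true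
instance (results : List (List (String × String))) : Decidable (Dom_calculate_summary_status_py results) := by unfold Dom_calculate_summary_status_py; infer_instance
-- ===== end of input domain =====

-- B merges A's three scans into one early-returning loop with two flags (objective: alternative, single pass instead of three scans).

-- ===== PORT A =====
-- r["status"]: first-match association-list lookup; none = KeyError (excluded by Pre_)
def pvStatus? (r : List (String × String)) : Option String := List.lookup "status" r

def calculate_summary_status_py (results : List (List (String × String))) : String :=
  if results.any (fun r => pvStatus? r == some "error") then "degraded"
  else if results.any (fun r => pvStatus? r == some "warning") then "warning"
  else if results.all (fun r => pvStatus? r == some "healthy") then "healthy"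
  else "unknown"

-- ===== PORT B =====
-- single loop with has_warning / all_healthy flags; returns "degraded" on first error
def pvGoB : List (List (String × String)) → Bool → Bool → String
  | [], hw, ah => if hw then "warning" else if ah then "healthy" else "unknown"
  | r :: rest, hw, ah =>
    let s := (pvStatus? r).getD ""
    if s == "error" then "degraded"
    else pvGoB rest (if s == "warning" then true else hw) (if s != "healthy" then false else ah)

def calculate_summary_status_py_alt (results : List (List (String × String))) : String :=
  pvGoB results false true

-- ===== PRECONDITION & SPEC =====
-- Pre_ excludes exactly the inputs on which both A and B raise KeyError: some dict lacks a
-- "status" key and no dict with status "error" precedes the first such dict (an earlier error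
-- short-circuits both programs to "degraded" before the bad lookup).
def Pre_calculate_summary_status_py (results : List (List (String × String))) : Prop :=
  (results.all (fun r => (pvStatus? r).isSome)) = true ∨
  ((results.takeWhile (fun r => (pvStatus? r).isSome)).any (fun r => pvStatus? r == some "error")) = true
instance (results : List (List (String × String))) : Decidable (Pre_calculate_summary_status_py results) := by unfold Pre_calculate_summary_status_py; infer_instance
def pvWitness_calculate_summary_status_py : (List (List (String × String))) := [[("status", "healthy")], [("status", "warning")]]

def Spec_calculate_summary_status_py (results : List (List (String × String))) (out : String) : Prop := out = calculate_summary_status_py_alt results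
instance (results : List (List (String × String))) (out : String) : Decidable (Spec_calculate_summary_status_py results out) := by unfold Spec_calculate_summary_status_py; infer_instance

-- ===== CLAIM (what is proved, stated in full; the proofs are below) =====
def Claim_equal_calculate_summary_status_py : Prop := ∀ (results : List (List (String × String))), Dom_calculate_summary_status_py results → Pre_calculate_summary_status_py results → Spec_calculate_summary_status_py results (calculate_summary_status_py results)

-- ===== LEMMAS AND PROOFS =====

-- loop invariant: pvGoB computes the chained decision with accumulated flags
theorem pvGoB_eq (results : List (List (String × String))) :
    ∀ (hw ah : Bool), (results.all (fun r => (pvStatus? r).isSome)) = true →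
    pvGoB results hw ah =
      (if results.any (fun r => pvStatus? r == some "error") then "degraded"
       else if hw || results.any (fun r => pvStatus? r == some "warning") then "warning"
       else if ah && results.all (fun r => pvStatus? r == some "healthy") then "healthy"
       else "unknown") := by
  induction results with
  | nil => intro hw ah _; simp [pvGoB]
  | cons r rest ih =>
    intro hw ah hpre
    simp only [List.all_cons, Bool.and_eq_true] at hpre
    obtain ⟨hr, hrest⟩ := hpre
    obtain ⟨s, hs⟩ := Option.isSome_iff_exists.mp hr
    simp only [pvGoB, hs, Option.getD_some]
    rw [ih _ _ hrest]
    simp only [List.any_cons, List.all_cons, hs]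
    by_cases he : s = "error"
    · simp [he]
    · by_cases hww : s = "warning"
      · simp [hww]
      · by_cases hh : s = "healthy"
        · simp [hh]
        · simp [he, hww, hh]

-- if an "error" status occurs before the first missing "status" key, B's loop returns "degraded"
theorem pvGoB_degraded (results : List (List (String × String))) :
    ∀ (hw ah : Bool),
    ((results.takeWhile (fun r => (pvStatus? r).isSome)).any (fun r => pvStatus? r == some "error")) = true →
    pvGoB results hw ah = "degraded" := by
  induction results with
  | nil => intro hw ah h; simp at h
  | cons r rest ih =>
    intro hw ah h
    by_cases hr : (pvStatus? r).isSome
    · obtain ⟨s, hs⟩ := Option.isSome_iff_exists.mp hr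
      rw [List.takeWhile_cons_of_pos (by simpa using hr)] at h
      simp only [List.any_cons, Bool.or_eq_true, hs] at h
      simp only [pvGoB, hs, Option.getD_some]
      rcases h with h | h
      · simp only [beq_iff_eq, Option.some.injEq] at h
        simp [h]
      · by_cases he : s = "error"
        · simp [he]
        · simp only [beq_iff_eq, he, if_false]
          exact ih _ _ h
    · rw [List.takeWhile_cons_of_neg (by simpa using hr)] at h
      simp at h

-- an element of the takeWhile prefix is an element of the list
theorem pvAnyError_of_prefix (results : List (List (String × String)))
    (h : ((results.takeWhile (fun r => (pvStatus? r).isSome)).any (fun r => pvStatus? r == some "error")) = true) :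
    (results.any (fun r => pvStatus? r == some "error")) = true := by
  rw [List.any_eq_true] at h ⊢
  obtain ⟨x, hx, hex⟩ := h
  exact ⟨x, (List.takeWhile_subset _ hx), hex⟩

-- ===== VERDICT (by name: the statement is the Claim_ definition above) =====
theorem calculate_summary_status_py_spec : Claim_equal_calculate_summary_status_py := by
  intro results _ hpre
  unfold Spec_calculate_summary_status_py calculate_summary_status_py calculate_summary_status_py_alt
  rcases hpre with hpre | hpre
  · rw [pvGoB_eq results false true hpre]; simp
  · rw [pvGoB_degraded results false true hpre, pvAnyError_of_prefix results hpre]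
    simp
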